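-- pv_equiv track=rewrite | github.com/gaoqihan/Gesture-Classifier | gesture_classifier_package/gesture_classifier/add_function_lib.py | normalize_new_class_input
-- ===== SOURCE A (Python) =====
-- from typing import Any, Dict, Iterable, List, Optional, Union
--
-- NewClassInput = Union[str, Iterable[str]]
--
-- def normalize_new_class_input(new_class_names: NewClassInput) -> List[str]:
--     if isinstance(new_class_names, str):
--         raw_names = [new_class_names]
--     else:
--         raw_names = list(new_class_names)
--
--     cleaned: List[str] = []
--     seen = set()
--     for name in raw_names:
--         if not isinstance(name, str):
--             raise ValueError("Each requested new class must be a string.")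
--         name = name.strip()
--         if len(name) == 0:
--             raise ValueError("Requested new class contains an empty string.")
--         if name not in seen:
--             cleaned.append(name)
--             seen.add(name)
--
--     if len(cleaned) == 0:
--         raise ValueError("At least one new class must be provided.")
--
--     return cleaned
-- ===== SOURCE B (Python) =====
-- def _clean(name):
--     if not isinstance(name, str):
--         raise ValueError("Each requested new class must be a string.")
--     name = name.strip()
--     if len(name) == 0:
--         raise ValueError("Requested new class contains an empty string.")
--     return name
--
--
-- def normalize_new_class_input(new_class_names):
--     if isinstance(new_class_names, str):
--         raw_names = [new_class_names]
--     else: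
--         raw_names = list(new_class_names)
--
--     cleaned = [_clean(name) for name in raw_names]
--     if len(cleaned) == 0:
--         raise ValueError("At least one new class must be provided.")
--
--     # backward pass: after it, first[name] is the index of name's FIRST occurrence
--     first = {}
--     for i, name in reversed(list(enumerate(cleaned))):
--         first[name] = i
--     # keep a name exactly at its first-occurrence position
--     return [name for i, name in enumerate(cleaned) if first[name] == i]
-- ===== Notes on version B (the rewrite author's own statement) =====
-- stated objective: alternative
-- what changed: B cleans all names in a first comprehension (helper _clean), raises the empty-input error before deduplicating, then deduplicates in two further passes with no seen-set: a backward pass builds a first-occurrence-index map and a positional filter keeps each name exactly at its first index, instead of A's single forward loop accumulating into a seen set.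
import Mathlib
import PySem

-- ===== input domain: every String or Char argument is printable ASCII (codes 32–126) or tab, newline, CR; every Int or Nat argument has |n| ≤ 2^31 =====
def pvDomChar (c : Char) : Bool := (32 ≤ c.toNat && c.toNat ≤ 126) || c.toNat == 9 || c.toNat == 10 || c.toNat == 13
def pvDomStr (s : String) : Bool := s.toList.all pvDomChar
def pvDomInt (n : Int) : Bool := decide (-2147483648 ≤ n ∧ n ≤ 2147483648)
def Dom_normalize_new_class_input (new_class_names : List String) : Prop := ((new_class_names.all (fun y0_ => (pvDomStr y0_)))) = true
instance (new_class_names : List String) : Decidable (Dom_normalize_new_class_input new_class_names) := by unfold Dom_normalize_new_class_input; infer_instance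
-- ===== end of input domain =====

-- B cleans all names first (a map), raises for empty input, then deduplicates without a seen set:
-- a backward pass builds a first-occurrence-index map and a positional filter keeps each name exactly
-- at its first index (objective: alternative; return-value equivalence).


-- ===== PORT A =====
-- A's loop: one pass keeping (cleaned, seen); the ValueError raises are excluded by Pre_.
def normalize_new_class_input (new_class_names : List String) : List String :=
  let raw_names := new_class_names
  (raw_names.foldl
    (fun (st : List String × PySem.Set String) name =>
      let nm := PySem.Str.strip name
      if PySem.Set.contains st.2 nm then st
      else (st.1 ++ [nm], PySem.Set.add st.2 nm))
    ([], PySem.Set.empty)).1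

-- ===== PORT B =====
-- B: clean every name; backward pass fills 'first' with first-occurrence indices; keep a name iff
-- its position equals first[name].
def normalize_new_class_input_alt (new_class_names : List String) : List String :=
  let cleaned := new_class_names.map PySem.Str.strip
  let first := ((PySem.List.enumerate cleaned 0).reverse).foldl
      (fun (d : PySem.Dict String Int) p => d.insert p.2 p.1) PySem.Dict.empty
  ((PySem.List.enumerate cleaned 0).filter
    (fun p => PySem.Dict.get? first p.2 == some p.1)).map Prod.snd

-- ===== PRECONDITION & SPEC =====
-- Pre_ excludes exactly the inputs where A raises ValueError: an element whose strip is empty, or the empty list.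
def Pre_normalize_new_class_input (new_class_names : List String) : Prop :=
  new_class_names ≠ [] ∧ ∀ s ∈ new_class_names, PySem.Str.strip s ≠ ""
instance (new_class_names : List String) : Decidable (Pre_normalize_new_class_input new_class_names) := by
  unfold Pre_normalize_new_class_input; infer_instance
def pvWitness_normalize_new_class_input : List String := [" cat ", "dog"]
def Spec_normalize_new_class_input (new_class_names : List String) (out : List String) : Prop := out = normalize_new_class_input_alt new_class_names
instance (new_class_names : List String) (out : List String) : Decidable (Spec_normalize_new_class_input new_class_names out) := by unfold Spec_normalize_new_class_input; infer_instance

-- ===== CLAIM (what is proved, stated in full; the proofs are below) =====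
def Claim_equal_normalize_new_class_input : Prop := ∀ (new_class_names : List String), Dom_normalize_new_class_input new_class_names → Pre_normalize_new_class_input new_class_names → Spec_normalize_new_class_input new_class_names (normalize_new_class_input new_class_names)

-- ===== LEMMAS AND PROOFS =====
-- A's state keeps cleaned = seen (as lists), so its first component is a Set.add fold.
lemma loop_fst_eq_add_fold (xs : List String) (s : List String) :
    (xs.foldl
      (fun (st : List String × PySem.Set String) name =>
        let nm := PySem.Str.strip name
        if PySem.Set.contains st.2 nm then st
        else (st.1 ++ [nm], PySem.Set.add st.2 nm))
      (s, s)).1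
    = xs.foldl (fun (t : PySem.Set String) name => PySem.Set.add t (PySem.Str.strip name)) s := by
  induction xs generalizing s with
  | nil => rfl
  | cons a tl ih =>
    rw [List.foldl_cons, List.foldl_cons]
    show (List.foldl
        (fun (st : List String × PySem.Set String) name =>
          let nm := PySem.Str.strip name
          if PySem.Set.contains st.2 nm then st
          else (st.1 ++ [nm], PySem.Set.add st.2 nm))
        (if PySem.Set.contains s (PySem.Str.strip a) then (s, s)
         else (s ++ [PySem.Str.strip a], PySem.Set.add s (PySem.Str.strip a))) tl).1
      = List.foldl (fun (t : PySem.Set String) name => PySem.Set.add t (PySem.Str.strip name))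
          (PySem.Set.add s (PySem.Str.strip a)) tl
    rw [PySem.Set.add]
    split_ifs with h
    · exact ih s
    · exact ih (s ++ [PySem.Str.strip a])

-- The backward insert pass leaves each name mapped to its FIRST index (the last insert wins).
lemma get?_backward_fold (l : List String) (s : Int) (y : String) :
    PySem.Dict.get? (((PySem.List.enumerate l s).reverse).foldl
        (fun (d : PySem.Dict String Int) p => d.insert p.2 p.1) PySem.Dict.empty) y
      = (PySem.List.index? l y).map (fun k => s + (k : Int)) := by
  induction l generalizing s with
  | nil => simp [PySem.List.enumerate_nil, PySem.Dict.get?_empty, PySem.List.index?_eq_idxOf?]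
  | cons x tl ih =>
    rw [PySem.List.enumerate_cons, List.reverse_cons, List.foldl_append, List.foldl_cons,
      List.foldl_nil]
    dsimp only
    by_cases hxy : y = x
    · subst hxy
      rw [PySem.Dict.get?_insert_self, PySem.List.index?_cons_self]
      simp
    · rw [PySem.Dict.get?_insert_of_ne _ _ hxy, ih (s + 1),
        PySem.List.index?_cons_of_ne _ (fun h => hxy h.symm)]
      rcases PySem.List.index? tl y with _ | k
      · rfl
      · simp
        omega

-- B's first-occurrence filter over any list equals Python's set-of-first-occurrences.
lemma firstIdx_filter_eq_ofList (l : List String) :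
    ((PySem.List.enumerate l 0).filter
      (fun p => (PySem.List.index? l p.2).map Int.ofNat == some p.1)).map Prod.snd
    = PySem.Set.ofList l := by
  induction l using List.reverseRecOn with
  | nil => rfl
  | append_singleton l a ih =>
    rw [PySem.List.enumerate_append, PySem.List.enumerate_cons, PySem.List.enumerate_nil,
      List.filter_append, List.filter_cons, List.filter_nil, List.map_append]
    have hpref : (PySem.List.enumerate l 0).filter
        (fun p => (PySem.List.index? (l ++ [a]) p.2).map Int.ofNat == some p.1)
        = (PySem.List.enumerate l 0).filter
        (fun p => (PySem.List.index? l p.2).map Int.ofNat == some p.1) := by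
      apply List.filter_congr
      intro p hp
      obtain ⟨k, hk, rfl⟩ := (PySem.List.mem_enumerate_iff _ _ _).1 hp
      rw [PySem.List.index?_append_of_mem _ (List.getElem_mem hk)]
    have hof : PySem.Set.ofList (l ++ [a]) = PySem.Set.add (PySem.Set.ofList l) a := by
      rw [PySem.Set.ofList_eq_foldl, List.foldl_append, List.foldl_cons, List.foldl_nil,
        ← PySem.Set.ofList_eq_foldl]
    rw [hpref, ih, hof, PySem.Set.add]
    by_cases hmem : a ∈ l
    · obtain ⟨k, hk⟩ := Option.isSome_iff_exists.1 ((PySem.List.index?_isSome_iff l a).2 hmem)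
      obtain ⟨hklt, -, -⟩ := PySem.List.getElem_of_index?_eq_some hk
      have hcond : PySem.List.index? (l ++ [a]) a = some k :=
        by rw [PySem.List.index?_append_of_mem _ hmem, hk]
      simp only [PySem.List.index?_eq_idxOf?] at hcond
      simp [hcond]
      rw [if_neg (by omega : ¬ k = l.length), if_pos hmem]
      simp
    · have hcond : PySem.List.index? (l ++ [a]) a = some l.length :=
        PySem.List.index?_append_singleton_self _ _ hmem
      simp only [PySem.List.index?_eq_idxOf?] at hcond
      simp [hcond, hmem]

-- ===== VERDICT (by name: the statement is the Claim_ definition above) =====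
theorem normalize_new_class_input_spec : Claim_equal_normalize_new_class_input := by
  intro xs _ _
  unfold Spec_normalize_new_class_input normalize_new_class_input normalize_new_class_input_alt
  have hcond : ∀ p : Int × String,
      (PySem.Dict.get? (((PySem.List.enumerate (xs.map PySem.Str.strip) 0).reverse).foldl
          (fun (d : PySem.Dict String Int) p => d.insert p.2 p.1) PySem.Dict.empty) p.2
        == some p.1)
      = ((PySem.List.index? (xs.map PySem.Str.strip) p.2).map Int.ofNat == some p.1) := by
    intro p
    rw [get?_backward_fold]
    rcases PySem.List.index? (xs.map PySem.Str.strip) p.2 with _ | k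
    · rfl
    · simp
  simp only [List.filter_congr (fun p _ => hcond p)]
  rw [firstIdx_filter_eq_ofList, PySem.Set.ofList_eq_foldl, List.foldl_map]
  exact loop_fst_eq_add_fold xs []
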